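-- pv_equiv track=rewrite | github.com/vaughn-k/Algorithm | baekjoon/2020/bj2302.py | find_possible
-- ===== SOURCE A (Python) =====
-- def find_possible(answer,now):
--     if(now == 1 or now == 0):
--         return 1
--     if(now == 2):
--         return 2
--     if(answer[now] != -1):
--         return answer[now]
--     tmp1 = find_possible(answer,now-1)
--     tmp2 = find_possible(answer,now-2)
--     total = tmp1 + tmp2
--     answer[now] = total
--     return total
-- ===== SOURCE B (Python) =====
-- def find_possible(answer, now):
--     def g(j):
--         if j == 0 or j == 1:
--             return 1
--         if j == 2:
--             return 2
--         return answer[j]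
--     for i in range(3, now + 1):
--         if answer[i] == -1:
--             answer[i] = g(i - 1) + g(i - 2)
--     return g(now)
-- ===== Notes on version B (the rewrite author's own statement) =====
-- stated objective: alternative
-- what changed: Replaced the top-down memoized recursion with an iterative bottom-up fill of answer[3..now] plus a small value-of-slot helper; no recursion remains.
-- outside the precondition, e.g. on find_possible([3, 4, -1], -1): A returns 7, B returns -1; on find_possible([0, 0, 0], 5): A raises IndexError, B raises IndexError
import Mathlib
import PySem

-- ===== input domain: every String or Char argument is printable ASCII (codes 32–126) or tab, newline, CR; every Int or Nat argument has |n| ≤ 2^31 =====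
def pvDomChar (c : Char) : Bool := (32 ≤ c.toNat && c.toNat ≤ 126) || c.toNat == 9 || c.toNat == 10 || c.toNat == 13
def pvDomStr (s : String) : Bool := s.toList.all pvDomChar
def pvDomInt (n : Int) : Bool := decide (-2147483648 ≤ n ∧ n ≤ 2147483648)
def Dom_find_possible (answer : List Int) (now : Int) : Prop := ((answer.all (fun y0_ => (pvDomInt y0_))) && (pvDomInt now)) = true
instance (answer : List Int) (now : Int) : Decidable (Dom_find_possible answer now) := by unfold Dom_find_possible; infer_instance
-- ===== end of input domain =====

-- B replaces A's top-down memoized recursion by an iterative bottom-up fill of the -1 slots of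
-- answer[3..now]; return values agree — the in-place caching pattern differs (B may also fill
-- intermediate -1 slots when answer[now] is already cached, where A fills nothing).


-- ===== PORT A =====
-- Literal port of A's recursion; the mutated list is threaded as state, the fuel argument only
-- makes the recursion structural (under Pre_ it is never exhausted).
def findPossibleLoop : Nat → List Int → Int → List Int × Int
  | 0, ans, _ => (ans, 0)
  | fuel+1, ans, now =>
    if now == 1 || now == 0 then (ans, 1)
    else if now == 2 then (ans, 2)
    else
      let c := PySem.List.pyGetD ans now (-1)
      if c ≠ -1 then (ans, c)
      else
        let r1 := findPossibleLoop fuel ans (now - 1)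
        let r2 := findPossibleLoop fuel r1.1 (now - 2)
        let total := r1.2 + r2.2
        (PySem.List.pySetD r2.1 now total, total)

def find_possible (answer : List Int) (now : Int) : Int :=
  (findPossibleLoop (now.toNat + 1) answer now).2

-- ===== PORT B =====
-- g(j): the value of slot j (literal bases 1/1/2, else the current answer[j])
def gAlt (answer : List Int) (j : Int) : Int :=
  if j == 0 || j == 1 then 1
  else if j == 2 then 2
  else PySem.List.pyGetD answer j (-1)

def find_possible_alt (answer : List Int) (now : Int) : Int :=
  let a := (PySem.List.pyRange 3 (now + 1) 1).foldl
    (fun a i =>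
      if PySem.List.pyGetD a i (-1) == -1 then
        PySem.List.pySetD a i (gAlt a (i - 1) + gAlt a (i - 2))
      else a)
    answer
  gAlt a now

-- ===== PRECONDITION & SPEC =====
-- Pre_ excludes: now ≥ len(answer) with now ≥ 3 (A raises IndexError), and negative now whose
-- wrapped slot answer[now] is -1 — there A's negative-index-wraparound recursion is accidental
-- and usually raises IndexError (a negative now hitting a cached slot ≠ -1 stays inside Pre_
-- and is matched).
def Pre_find_possible (answer : List Int) (now : Int) : Prop :=
  (0 ≤ now ∧ (now ≤ 2 ∨ now < (answer.length : Int))) ∨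
  (now < 0 ∧ PySem.Raise.InRange answer.length now ∧ PySem.List.pyGetD answer now (-1) ≠ -1)
instance (answer : List Int) (now : Int) : Decidable (Pre_find_possible answer now) := by
  unfold Pre_find_possible; infer_instance

def pvWitness_find_possible : List Int × Int := ([-1, -1, -1, -1, -1], 4)

def Spec_find_possible (answer : List Int) (now : Int) (out : Int) : Prop := out = find_possible_alt answer now
instance (answer : List Int) (now : Int) (out : Int) : Decidable (Spec_find_possible answer now out) := by unfold Spec_find_possible; infer_instance

-- ===== CLAIM (what is proved, stated in full; the proofs are below) =====
def Claim_equal_find_possible : Prop := ∀ (answer : List Int) (now : Int), Dom_find_possible answer now → Pre_find_possible answer now → Spec_find_possible answer now (find_possible answer now)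

-- ===== LEMMAS AND PROOFS =====

-- The common specification value: vSpec ans n is the count for slot n, reading cached (≠ -1)
-- entries of the ORIGINAL list and recursing Fibonacci-style through -1 entries.
def vSpec (ans : List Int) : Nat → Int
  | 0 => 1
  | 1 => 1
  | 2 => 2
  | n+3 =>
    if ans.getD (n+3) (-1) ≠ -1 then ans.getD (n+3) (-1)
    else vSpec ans (n+2) + vSpec ans (n+1)

lemma vSpec_of_cached (ans : List Int) (n : Nat) (h3 : 3 ≤ n)
    (hc : ans.getD n (-1) ≠ -1) : vSpec ans n = ans.getD n (-1) := by
  obtain ⟨m, rfl⟩ : ∃ m, n = m + 3 := ⟨n - 3, by omega⟩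
  rw [vSpec, if_pos hc]

lemma vSpec_of_uncached (ans : List Int) (n : Nat) (h3 : 3 ≤ n)
    (hc : ans.getD n (-1) = -1) : vSpec ans n = vSpec ans (n-1) + vSpec ans (n-2) := by
  obtain ⟨m, rfl⟩ : ∃ m, n = m + 3 := ⟨n - 3, by omega⟩
  rw [vSpec, if_neg (not_not.mpr hc), show m+3-1 = m+2 from rfl, show m+3-2 = m+1 from rfl]

lemma getD_set_eq (xs : List Int) (i j : Nat) (v : Int) (h : i < xs.length) :
    (xs.set i v).getD j (-1) = if i = j then v else xs.getD j (-1) := by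
  simp [List.getD, List.getElem?_set, h]; split <;> simp

-- invariant for A's state: each slot holds its original value or (from index 3 on) its vSpec value
def InvA (ans a : List Int) : Prop :=
  a.length = ans.length ∧
  ∀ j : Nat, j < ans.length →
    a.getD j (-1) = ans.getD j (-1) ∨ (3 ≤ j ∧ a.getD j (-1) = vSpec ans j)

-- A's loop returns the vSpec value and preserves the invariant
lemma findA_correct (ans : List Int) :
    ∀ fuel (n : Nat) (a : List Int), n < fuel → (n ≤ 2 ∨ n < ans.length) → InvA ans a →
      (findPossibleLoop fuel a (n : Int)).2 = vSpec ans n ∧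
      InvA ans (findPossibleLoop fuel a (n : Int)).1 := by
  intro fuel
  induction fuel with
  | zero => intro n a h; omega
  | succ fuel ih =>
    intro n a hfuel hrange hInv
    match n with
    | 0 => simp [findPossibleLoop, vSpec, hInv]
    | 1 => simp [findPossibleLoop, vSpec, hInv]
    | 2 => simp [findPossibleLoop, vSpec, hInv]
    | m+3 =>
      have hlen : (m+3) < ans.length := by omega
      have h1 : ((((m+3:Nat)):Int) == 1 || (((m+3:Nat)):Int) == 0) = false := by simp; omega
      have h2 : ((((m+3:Nat)):Int) == 2) = false := by simp; omega
      have hget := PySem.List.pyGetD_natCast (xs := a) (n := m+3) (d := (-1:Int))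
      by_cases hc : a.getD (m+3) (-1) = -1
      · -- uncached in the current state: ans too is uncached there
        have hans : ans.getD (m+3) (-1) = -1 := by
          rcases hInv.2 (m+3) hlen with h | ⟨_, h⟩
          · rw [← h]; exact hc
          · by_contra hne
            have := vSpec_of_cached ans (m+3) (by omega) hne
            rw [h, this] at hc; exact hne hc
        have e1 : ((m+3:Nat):Int) - 1 = ((m+2:Nat):Int) := by push_cast; ring
        have e2 : ((m+3:Nat):Int) - 2 = ((m+1:Nat):Int) := by push_cast; ring
        obtain ⟨hv1, hi1⟩ := ih (m+2) a (by omega) (by omega) hInv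
        obtain ⟨hv2, hi2⟩ := ih (m+1) (findPossibleLoop fuel a ((m+2:Nat):Int)).1
          (by omega) (by omega) hi1
        simp only [findPossibleLoop, h1, h2, Bool.false_eq_true, if_false, hget, e1, e2]
        rw [if_neg (not_not.mpr hc)]
        rw [PySem.List.pySetD_natCast (xs := (findPossibleLoop fuel (findPossibleLoop fuel a ((m+2:Nat):Int)).1 ((m+1:Nat):Int)).1)
            (n := m+3)
            (v := (findPossibleLoop fuel a ((m+2:Nat):Int)).2 +
              (findPossibleLoop fuel (findPossibleLoop fuel a ((m+2:Nat):Int)).1 ((m+1:Nat):Int)).2)]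
        have hvtot : (findPossibleLoop fuel a ((m+2:Nat):Int)).2 +
            (findPossibleLoop fuel (findPossibleLoop fuel a ((m+2:Nat):Int)).1 ((m+1:Nat):Int)).2
            = vSpec ans (m+3) := by
          rw [hv1, hv2, vSpec_of_uncached ans (m+3) (by omega) hans,
            show m+3-1 = m+2 from rfl, show m+3-2 = m+1 from rfl]
        have hr2len : (m+3) <
            (findPossibleLoop fuel (findPossibleLoop fuel a ((m+2:Nat):Int)).1 ((m+1:Nat):Int)).1.length := by
          rw [hi2.1]; exact hlen
        refine ⟨hvtot, ?_, ?_⟩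
        · rw [List.length_set]; exact hi2.1
        · intro j hj
          rw [getD_set_eq _ _ _ _ hr2len]
          by_cases hje : (m+3) = j
          · subst hje; rw [if_pos rfl]; right; exact ⟨by omega, hvtot⟩
          · rw [if_neg hje]; exact hi2.2 j hj
      · -- cached in the current state
        have hval : a.getD (m+3) (-1) = vSpec ans (m+3) := by
          rcases hInv.2 (m+3) hlen with h | ⟨_, h⟩
          · rw [h, vSpec_of_cached ans (m+3) (by omega) (by rw [← h]; exact hc)]
          · exact h
        simp only [findPossibleLoop, h1, h2, Bool.false_eq_true, if_false, hget]
        rw [if_pos hc]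
        exact ⟨hval, hInv⟩

-- invariant for B's loop after processing indices 3..k: slots 3..k hold their vSpec value,
-- all other slots are untouched
def InvB (ans : List Int) (k : Nat) (a : List Int) : Prop :=
  a.length = ans.length ∧
  ∀ j : Nat, j < ans.length →
    (3 ≤ j ∧ j ≤ k → a.getD j (-1) = vSpec ans j) ∧
    ((j < 3 ∨ k < j) → a.getD j (-1) = ans.getD j (-1))

lemma gAlt_eq_vSpec (ans a : List Int) (k j : Nat) (hInv : InvB ans k a) (hj : j ≤ k)
    (hlen : j < ans.length) : gAlt a ((j:Nat):Int) = vSpec ans j := by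
  match j with
  | 0 => simp [gAlt, vSpec]
  | 1 => simp [gAlt, vSpec]
  | 2 => norm_num [gAlt, vSpec]
  | p+3 =>
    have h1 : ((((p+3:Nat)):Int) == 0 || (((p+3:Nat)):Int) == 1) = false := by simp; omega
    have h2 : ((((p+3:Nat)):Int) == 2) = false := by simp; omega
    rw [gAlt, h1, h2]
    have hx := (hInv.2 (p+3) hlen).1 ⟨by omega, hj⟩
    rw [← PySem.List.pyGetD_natCast (xs := a) (n := p+3) (d := (-1:Int))] at hx
    exact_mod_cast hx

def stepB : List Int → Int → List Int := fun a i =>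
  if PySem.List.pyGetD a i (-1) == -1 then
    PySem.List.pySetD a i (gAlt a (i - 1) + gAlt a (i - 2))
  else a

lemma findB_correct (ans : List Int) :
    ∀ n : Nat, n < ans.length →
      InvB ans n ((PySem.List.pyRange 3 (((n:Nat):Int) + 1) 1).foldl stepB ans) := by
  intro n
  induction n with
  | zero =>
    intro _
    rw [PySem.List.pyRange_one_eq_nil (by norm_num)]
    exact ⟨rfl, fun j hj => ⟨fun h => by omega, fun _ => rfl⟩⟩
  | succ n ih =>
    intro hlen
    by_cases h3 : n + 1 < 3
    · rw [PySem.List.pyRange_one_eq_nil (by push_cast; omega)]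
      exact ⟨rfl, fun j hj => ⟨fun h => by omega, fun _ => rfl⟩⟩
    · have hsplit : PySem.List.pyRange 3 (((n+1:Nat):Int)+1) 1
          = PySem.List.pyRange 3 (((n:Nat):Int)+1) 1 ++ [((n+1:Nat):Int)] := by
        have := PySem.List.pyRange_one_succ_right (a := 3) (b := ((n+1:Nat):Int))
          (by push_cast; omega)
        rw [this]; norm_num
      have hlen' : n < ans.length := by omega
      have ihB := ih hlen'
      rw [hsplit, List.foldl_append, List.foldl_cons, List.foldl_nil]
      have ha0len : ((PySem.List.pyRange 3 (((n:Nat):Int) + 1) 1).foldl stepB ans).length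
          = ans.length := ihB.1
      have hn1lt : (n+1) < ((PySem.List.pyRange 3 (((n:Nat):Int) + 1) 1).foldl stepB ans).length := by
        omega
      have hgetn1 : PySem.List.pyGetD ((PySem.List.pyRange 3 (((n:Nat):Int) + 1) 1).foldl stepB ans)
          ((n+1:Nat):Int) (-1) = ans.getD (n+1) (-1) := by
        rw [PySem.List.pyGetD_natCast]
        exact (ihB.2 (n+1) hlen).2 (Or.inr (by omega))
      have e1 : ((n+1:Nat):Int) - 1 = ((n:Nat):Int) := by push_cast; ring
      have e2 : ((n+1:Nat):Int) - 2 = ((n-1:Nat):Int) := by omega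
      have hg1 := gAlt_eq_vSpec ans _ n n ihB (le_refl n) hlen'
      have hg2 := gAlt_eq_vSpec ans _ n (n-1) ihB (by omega) (by omega)
      by_cases hcach : ans.getD (n+1) (-1) = -1
      · have hv : vSpec ans n + vSpec ans (n-1) = vSpec ans (n+1) := by
          rw [vSpec_of_uncached ans (n+1) (by omega) hcach,
            show n+1-1 = n from rfl, show n+1-2 = n-1 from rfl]
        simp only [stepB, hgetn1, hcach, BEq.rfl, if_true, e1, e2, hg1, hg2,
          PySem.List.pySetD_natCast]
        refine ⟨by rw [List.length_set]; exact ha0len, ?_⟩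
        intro j hj
        rw [getD_set_eq _ _ _ _ hn1lt]
        by_cases hje : (n+1) = j
        · subst hje
          exact ⟨fun _ => by rw [if_pos rfl]; exact hv, fun h => by omega⟩
        · rw [if_neg hje]
          exact ⟨fun h => (ihB.2 j hj).1 ⟨h.1, by omega⟩,
            fun h => (ihB.2 j hj).2 (by omega)⟩
      · simp only [stepB, hgetn1, beq_iff_eq, if_neg hcach]
        refine ⟨ihB.1, ?_⟩
        intro j hj
        by_cases hje : (n+1) = j
        · subst hje
          refine ⟨fun _ => ?_, fun h => by omega⟩
          rw [(ihB.2 (n+1) hj).2 (Or.inr (by omega)),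
            vSpec_of_cached ans (n+1) (by omega) hcach]
        · exact ⟨fun h => (ihB.2 j hj).1 ⟨h.1, by omega⟩,
            fun h => (ihB.2 j hj).2 (by omega)⟩

-- ===== VERDICT (by name: the statement is the Claim_ definition above) =====
theorem find_possible_spec : Claim_equal_find_possible := by
  intro answer now _ hpre
  unfold Spec_find_possible find_possible find_possible_alt
  have hstep : (fun (a : List Int) (i : Int) =>
      if PySem.List.pyGetD a i (-1) == -1 then
        PySem.List.pySetD a i (gAlt a (i - 1) + gAlt a (i - 2))
      else a) = stepB := rfl
  rw [hstep]
  rcases hpre with ⟨h0, hr⟩ | ⟨hneg, hin, hne⟩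
  · obtain ⟨n, rfl⟩ : ∃ n : Nat, now = (n : Int) := ⟨now.toNat, (Int.toNat_of_nonneg h0).symm⟩
    have hrn : n ≤ 2 ∨ n < answer.length := by
      rcases hr with h | h
      · left; exact_mod_cast h
      · right; exact_mod_cast h
    have hA := (findA_correct answer (n+1) n answer (by omega) hrn
      ⟨rfl, fun _ _ => Or.inl rfl⟩).1
    rw [Int.toNat_natCast n, hA]
    by_cases hlen : n < answer.length
    · exact (gAlt_eq_vSpec answer _ n n (findB_correct answer n hlen) (le_refl n) hlen).symm
    · have hn2 : n ≤ 2 := by omega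
      rw [PySem.List.pyRange_one_eq_nil (by omega), List.foldl_nil]
      interval_cases n <;> norm_num [gAlt, vSpec]
  · have h1 : (now == 1 || now == 0) = false := by simp; omega
    have h2 : (now == 2) = false := by simp; omega
    have g1 : (now == 0 || now == 1) = false := by simp; omega
    rw [Int.toNat_of_nonpos (le_of_lt hneg)]
    simp only [findPossibleLoop, h1, h2, Bool.false_eq_true, if_false]
    rw [if_pos hne]
    rw [PySem.List.pyRange_one_eq_nil (by omega), List.foldl_nil, gAlt, g1, h2]
    simp
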